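-- pv_equiv track=rewrite | github.com/gubenkoved/daily-coding-problem | python/dcp_361_guess_the_code.py | guess
-- ===== SOURCE A (Python) =====
-- def guess(map: dict):
--
--     def count_matching(a, b):
--         a, b = str(a), str(b)
--         return sum([1 for i in range(min(len(a), len(b))) if a[i] == b[i]])
--
--     result = []
--
--     for possible in range(100_000, 999_999):
--         if len(set(str(possible))) != 6:
--             continue
--
--         all_match = True
--
--         for sample, sample_matches in map.items():
--             if count_matching(possible, sample) != sample_matches:
--                 all_match = False
--                 break
--
--         if all_match:
--             result.append(possible)
--
--     return result
-- ===== SOURCE B (Python) =====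
-- def guess(map: dict):
--     samples = [(str(sample), matches) for sample, matches in map.items()]
--
--     def matches_all(value):
--         s = str(value)
--         return all(sum(a == b for a, b in zip(s, samp)) == want
--                    for samp, want in samples)
--
--     result = []
--
--     def extend(value, depth, remaining):
--         if depth == 6:
--             if matches_all(value):
--                 result.append(value)
--             return
--         for d in remaining:
--             extend(value * 10 + d, depth + 1, [r for r in remaining if r != d])
--
--     for first in range(1, 10):
--         extend(first, 1, [d for d in range(10) if d != first])
--
--     return sorted(result)
-- ===== Notes on version B (the rewrite author's own statement) =====
-- stated objective: alternative
-- what changed: B replaces A's scan of all 899,999 six-digit numbers with a per-candidate set-of-digits test by a recursive backtracking enumeration that only ever builds the 136,080 candidates with distinct digits (leading digit 1-9, each chosen digit removed from the pool), constructs the value arithmetically, and returns the collected matches sorted; intended as faster, measured about 1.5-1.9x but not consistently above the 1.5x threshold.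
import Mathlib
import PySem

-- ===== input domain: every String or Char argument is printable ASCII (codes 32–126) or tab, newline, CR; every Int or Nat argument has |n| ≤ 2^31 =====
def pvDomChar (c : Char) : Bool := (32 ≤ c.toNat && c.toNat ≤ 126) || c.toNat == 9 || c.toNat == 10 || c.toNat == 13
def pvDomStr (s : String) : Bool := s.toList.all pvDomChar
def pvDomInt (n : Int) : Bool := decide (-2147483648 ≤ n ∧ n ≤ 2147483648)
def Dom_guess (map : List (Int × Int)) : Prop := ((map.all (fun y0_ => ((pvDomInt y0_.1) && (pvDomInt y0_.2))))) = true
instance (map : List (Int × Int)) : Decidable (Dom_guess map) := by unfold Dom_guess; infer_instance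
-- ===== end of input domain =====

-- B replaces A's scan over all 899,999 six-digit numbers (testing each for distinct digits via a
-- set) by a recursive backtracking enumeration that only builds candidates with distinct digits
-- (leading digit 1-9, each chosen digit removed from the pool), constructing the value
-- arithmetically and returning the collected matches sorted (objective: alternative).

-- ===== PORT A =====
def countMatching (a b : Int) : Int :=
  let sa := PySem.Int.toStr a
  let sb := PySem.Int.toStr b
  (((PySem.List.pyRange 0 (min (PySem.Str.len sa) (PySem.Str.len sb)) 1).filter
      (fun i => PySem.Str.pyGet? sa i == PySem.Str.pyGet? sb i)).map (fun _ => (1 : Int))).sum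

-- the 'for sample, sample_matches in map.items(): … break' loop with its all_match flag
def allMatchA : List (Int × Int) → Int → Bool
  | [], _ => true
  | (sample, sampleMatches) :: rest, possible =>
    if countMatching possible sample ≠ sampleMatches then false
    else allMatchA rest possible

def guess (map : List (Int × Int)) : List Int :=
  (PySem.List.pyRange 100000 999999 1).foldl
    (fun result possible =>
      if (PySem.Set.ofList ((PySem.Int.toStr possible).toList)).length ≠ 6 then result
      else if allMatchA map possible then result ++ [possible]
      else result) []

-- ===== PORT B =====
-- 'all(sum(a == b for a, b in zip(s, samp)) == want for samp, want in samples)'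
def matchesAllB (samples : List (String × Int)) (value : Int) : Bool :=
  let s := PySem.Int.toStr value
  samples.all (fun sw =>
    (((s.toList.zip sw.1.toList)).map (fun ab => if ab.1 == ab.2 then (1 : Int) else 0)).sum == sw.2)

-- the recursive 'extend(value, depth, remaining)' with the shared result list threaded through
-- (remaining.attach only supplies the membership proof for termination)
def extendB (samples : List (String × Int)) (result : List Int) (value depth : Int)
    (remaining : List Int) : List Int :=
  if depth == 6 then
    if matchesAllB samples value then result ++ [value] else result
  else
    remaining.attach.foldl
      (fun res d =>
        extendB samples res (value * 10 + d.val) (depth + 1) (remaining.filter (· ≠ d.val)))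
      result
termination_by remaining.length
decreasing_by
  have h : (List.filter (fun x : { x // x ∈ remaining } => decide ((x : Int) ≠ (d : Int)))
        remaining.attach).length < remaining.attach.length :=
    List.length_filter_lt_length_iff_exists.mpr ⟨d, List.mem_attach _ d, by simp⟩
  simpa using h

def guess_alt (map : List (Int × Int)) : List Int :=
  let samples := map.map (fun sm => (PySem.Int.toStr sm.1, sm.2))
  let result := (PySem.List.pyRange 1 10 1).foldl
    (fun res first =>
      extendB samples res first 1 ((PySem.List.pyRange 0 10 1).filter (· ≠ first))) []
  PySem.List.sorted result (fun x => x)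

-- ===== PRECONDITION & SPEC =====
def Spec_guess (map : List (Int × Int)) (out : List Int) : Prop := out = guess_alt map
instance (map : List (Int × Int)) (out : List Int) : Decidable (Spec_guess map out) := by unfold Spec_guess; infer_instance

-- ===== CLAIM (what is proved, stated in full; the proofs are below) =====
def Claim_equal_guess : Prop := ∀ (map : List (Int × Int)), Dom_guess map → Spec_guess map (guess map)

-- ===== LEMMAS AND PROOFS =====

-- ---- A side: guess as a filter of the range ----
def pA (map : List (Int × Int)) (p : Int) : Bool :=
  decide ((PySem.Set.ofList ((PySem.Int.toStr p).toList)).length = 6) && allMatchA map p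

lemma guess_eq_filter (map : List (Int × Int)) :
    guess map = (PySem.List.pyRange 100000 999999 1).filter (pA map) := by
  unfold guess
  have hbody : (fun (result : List Int) (possible : Int) =>
      if (PySem.Set.ofList ((PySem.Int.toStr possible).toList)).length ≠ 6 then result
      else if allMatchA map possible then result ++ [possible]
      else result)
      = fun result possible => if pA map possible then result ++ [possible] else result := by
    funext result possible
    by_cases h : (PySem.Set.ofList ((PySem.Int.toStr possible).toList)).length = 6 <;>
      by_cases h2 : allMatchA map possible <;> simp [pA, h2]
  rw [hbody, PySem.List.foldl_append_if_eq_filter, List.nil_append]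

-- ---- B side: the backtracking enumeration as (candidate list).filter ----

-- pure candidate generator: m more digits to choose from rem
def genP : Nat → Int → List Int → List Int
  | 0, v, _ => [v]
  | m + 1, v, rem => rem.flatMap (fun d => genP m (v * 10 + d) (rem.filter (· ≠ d)))

lemma extendB_eq_filter (samples : List (String × Int)) :
    ∀ (m : Nat) (v : Int) (rem : List Int) (res : List Int),
      extendB samples res v (6 - (m : Int)) rem
        = res ++ (genP m v rem).filter (matchesAllB samples) := by
  intro m
  induction m with
  | zero =>
    intro v rem res
    rw [extendB.eq_def]
    simp [genP, List.filter]
    by_cases h : matchesAllB samples v <;> simp [h]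
  | succ m ih =>
    intro v rem res
    rw [extendB.eq_def]
    have hne : ((6 - ((m + 1 : Nat) : Int) == 6)) = false := by
      simp
      omega
    rw [hne]
    simp only [Bool.false_eq_true, if_false]
    have hdep : 6 - ((m + 1 : Nat) : Int) + 1 = 6 - (m : Int) := by push_cast; ring
    have hfun : (fun (res : List Int) (d : { x // x ∈ rem }) =>
        extendB samples res (v * 10 + d.val) (6 - ((m + 1 : Nat) : Int) + 1)
          (rem.filter (· ≠ d.val)))
        = fun res d =>
            res ++ (genP m (v * 10 + d.val) (rem.filter (· ≠ d.val))).filter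
              (matchesAllB samples) := by
      funext res d
      rw [hdep, ih]
    rw [hfun]
    rw [List.foldl_attach
      (f := fun (res : List Int) (dv : Int) =>
        res ++ (genP m (v * 10 + dv) (rem.filter (· ≠ dv))).filter (matchesAllB samples))]
    rw [PySem.List.foldl_append_eq_flatMap]
    rw [genP, List.filter_flatMap]

def samplesOf (map : List (Int × Int)) : List (String × Int) :=
  map.map (fun sm => (PySem.Int.toStr sm.1, sm.2))

def poolOf (f : Int) : List Int := (PySem.List.pyRange 0 10 1).filter (· ≠ f)

def bPre : List Int := (PySem.List.pyRange 1 10 1).flatMap (fun f => genP 5 f (poolOf f))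

lemma guess_alt_eq (map : List (Int × Int)) :
    guess_alt map
      = PySem.List.sorted (bPre.filter (matchesAllB (samplesOf map))) (fun x => x) := by
  show PySem.List.sorted
      ((PySem.List.pyRange 1 10 1).foldl
        (fun res first =>
          extendB (map.map (fun sm => (PySem.Int.toStr sm.1, sm.2))) res first 1
            ((PySem.List.pyRange 0 10 1).filter (· ≠ first))) [])
      (fun x => x) = _
  unfold bPre samplesOf poolOf
  have hfun : (fun (res : List Int) (first : Int) =>
      extendB (map.map (fun sm => (PySem.Int.toStr sm.1, sm.2))) res first 1
        ((PySem.List.pyRange 0 10 1).filter (· ≠ first)))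
      = fun res first =>
        res ++ (genP 5 first ((PySem.List.pyRange 0 10 1).filter (· ≠ first))).filter
            (matchesAllB (map.map (fun sm => (PySem.Int.toStr sm.1, sm.2)))) := by
    funext res first
    have h1 : (1 : Int) = 6 - ((5 : Nat) : Int) := by norm_num
    rw [h1, extendB_eq_filter]
  rw [hfun, PySem.List.foldl_append_eq_flatMap, List.nil_append, List.filter_flatMap]

-- ---- characterisation of genP ----

lemma mem_genP : ∀ (m : Nat) (v : Int) (rem : List Int) (p : Int),
    p ∈ genP m v rem
      ↔ ∃ ds : List Int, ds.length = m ∧ ds.Nodup ∧ (∀ d ∈ ds, d ∈ rem)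
          ∧ p = ds.foldl (fun a d => a * 10 + d) v := by
  intro m
  induction m with
  | zero =>
    intro v rem p
    constructor
    · intro h
      simp [genP] at h
      exact ⟨[], rfl, List.nodup_nil, by simp, by simp [h]⟩
    · rintro ⟨ds, hlen, -, -, hp⟩
      rw [List.length_eq_zero_iff] at hlen
      subst hlen
      simp [genP, hp]
  | succ m ih =>
    intro v rem p
    constructor
    · intro h
      simp only [genP, List.mem_flatMap] at h
      obtain ⟨d, hd, hmem⟩ := h
      obtain ⟨ds, hlen, hnd, hsub, hp⟩ := (ih _ _ _).mp hmem
      refine ⟨d :: ds, by simp [hlen], ?_, ?_, by simp [hp]⟩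
      · refine List.nodup_cons.mpr ⟨?_, hnd⟩
        intro hdin
        have := hsub d hdin
        simp at this
      · intro x hx
        rcases List.mem_cons.mp hx with h1 | h1
        · exact h1 ▸ hd
        · exact (List.mem_filter.mp (hsub x h1)).1
    · rintro ⟨ds, hlen, hnd, hsub, hp⟩
      cases ds with
      | nil => simp at hlen
      | cons d ds' =>
        simp only [genP, List.mem_flatMap]
        refine ⟨d, hsub d (by simp), ?_⟩
        apply (ih _ _ _).mpr
        refine ⟨ds', by simpa using hlen, (List.nodup_cons.mp hnd).2, ?_, by simpa using hp⟩
        intro x hx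
        refine List.mem_filter.mpr ⟨hsub x (by simp [hx]), ?_⟩
        simp
        intro he
        exact (List.nodup_cons.mp hnd).1 (he ▸ hx)

lemma bound_genP : ∀ (m : Nat) (v : Int) (rem : List Int) (p : Int),
    (∀ d ∈ rem, 0 ≤ d ∧ d < 10) → p ∈ genP m v rem
      → v * 10 ^ m ≤ p ∧ p < (v + 1) * 10 ^ m := by
  intro m
  induction m with
  | zero => intro v rem p _ h; simp [genP] at h; subst h; norm_num
  | succ m ih =>
    intro v rem p hrem h
    simp only [genP, List.mem_flatMap] at h
    obtain ⟨d, hd, hmem⟩ := h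
    have hdb := hrem d hd
    have hsub : ∀ x ∈ rem.filter (· ≠ d), 0 ≤ x ∧ x < 10 :=
      fun x hx => hrem x (List.mem_filter.mp hx).1
    have hb := ih (v * 10 + d) _ p hsub hmem
    have h10 : (0 : Int) < 10 ^ m := by positivity
    have e1 : v * 10 ^ (m + 1) = (v * 10) * 10 ^ m := by ring
    have e2 : (v + 1) * 10 ^ (m + 1) = (v * 10 + 10) * 10 ^ m := by ring
    constructor
    · rw [e1]
      calc (v * 10) * 10 ^ m ≤ (v * 10 + d) * 10 ^ m := by nlinarith
        _ ≤ p := hb.1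
    · rw [e2]
      calc p < (v * 10 + d + 1) * 10 ^ m := hb.2
        _ ≤ (v * 10 + 10) * 10 ^ m := by nlinarith

lemma nodup_genP : ∀ (m : Nat) (v : Int) (rem : List Int),
    (∀ d ∈ rem, 0 ≤ d ∧ d < 10) → rem.Nodup → (genP m v rem).Nodup := by
  intro m
  induction m with
  | zero => intro v rem _ _; simp [genP]
  | succ m ih =>
    intro v rem hrem hnd
    rw [genP]
    apply List.nodup_flatMap.mpr
    constructor
    · intro d hd
      exact ih _ _ (fun x hx => hrem x (List.mem_filter.mp hx).1) (hnd.filter _)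
    · apply List.Pairwise.imp_of_mem (l := rem)
        (R := fun a b => a ≠ b)
      · intro a b ha hb hne p hpa hpb
        have hba := bound_genP m (v * 10 + a) _ p
          (fun x hx => hrem x (List.mem_filter.mp hx).1) hpa
        have hbb := bound_genP m (v * 10 + b) _ p
          (fun x hx => hrem x (List.mem_filter.mp hx).1) hpb
        have h10 : (0 : Int) < 10 ^ m := by positivity
        have l1 : (v * 10 + a) * 10 ^ m < (v * 10 + b + 1) * 10 ^ m := by
          calc (v * 10 + a) * 10 ^ m ≤ p := hba.1
            _ < (v * 10 + b + 1) * 10 ^ m := hbb.2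
        have l2 : (v * 10 + b) * 10 ^ m < (v * 10 + a + 1) * 10 ^ m := by
          calc (v * 10 + b) * 10 ^ m ≤ p := hbb.1
            _ < (v * 10 + a + 1) * 10 ^ m := hba.2
        have c1 := lt_of_mul_lt_mul_right l1 h10.le
        have c2 := lt_of_mul_lt_mul_right l2 h10.le
        omega
      · exact hnd

-- ---- digit strings of the generated values ----

lemma toDigitsCore_shift : ∀ (f n : Nat) (l : List Char), n < f →
    Nat.toDigitsCore 10 f n l = Nat.toDigitsCore 10 (n + 1) n [] ++ l := by
  intro f
  induction f using Nat.strong_induction_on with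
  | _ f ihf =>
    intro n l hnf
    match f, hnf with
    | f' + 1, hnf =>
      have hstep : ∀ (g m : Nat) (acc : List Char),
          Nat.toDigitsCore 10 (g + 1) m acc
            = if m / 10 = 0 then Nat.digitChar (m % 10) :: acc
              else Nat.toDigitsCore 10 g (m / 10) (Nat.digitChar (m % 10) :: acc) := by
        intro g m acc; rfl
      by_cases h : n / 10 = 0
      · rw [hstep, if_pos h, hstep, if_pos h]
        rfl
      · have hn1 : 1 ≤ n := by omega
        have hdiv : n / 10 < n := by omega
        rw [hstep, if_neg h]
        rw [ihf f' (by omega) (n / 10) _ (by omega)]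
        have hrhs : Nat.toDigitsCore 10 (n + 1) n [] =
            Nat.toDigitsCore 10 (n / 10 + 1) (n / 10) [] ++ [Nat.digitChar (n % 10)] := by
          rw [hstep, if_neg h]
          rw [ihf n (by omega) (n / 10) _ (by omega)]
        rw [hrhs, List.append_assoc]
        rfl

lemma toDigits_shift (n k : Nat) (hn : 1 ≤ n) (hk : k < 10) :
    Nat.toDigits 10 (10 * n + k) = Nat.toDigits 10 n ++ [Nat.digitChar k] := by
  show Nat.toDigitsCore 10 (10 * n + k + 1) (10 * n + k) []
      = Nat.toDigitsCore 10 (n + 1) n [] ++ [Nat.digitChar k]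
  have hstep : ∀ (g m : Nat) (acc : List Char),
      Nat.toDigitsCore 10 (g + 1) m acc
        = if m / 10 = 0 then Nat.digitChar (m % 10) :: acc
          else Nat.toDigitsCore 10 g (m / 10) (Nat.digitChar (m % 10) :: acc) := by
    intro g m acc; rfl
  have hdiv : (10 * n + k) / 10 = n := by omega
  have hmod : (10 * n + k) % 10 = k := by omega
  rw [hstep, if_neg (by omega), hdiv, hmod]
  exact toDigitsCore_shift (10 * n + k) n _ (by omega)

lemma toChars_shift (v d : Int) (hv : 1 ≤ v) (hd0 : 0 ≤ d) (hd9 : d < 10) :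
    PySem.Int.toChars (v * 10 + d) = PySem.Int.toChars v ++ [Nat.digitChar d.toNat] := by
  unfold PySem.Int.toChars
  rw [if_neg (by omega), if_neg (by omega)]
  have h1 : (v * 10 + d).toNat = 10 * v.toNat + d.toNat := by omega
  rw [h1]
  exact toDigits_shift v.toNat d.toNat (by omega) (by omega)

lemma toChars_foldl : ∀ (ds : List Int) (v : Int), 1 ≤ v → (∀ d ∈ ds, 0 ≤ d ∧ d < 10) →
    PySem.Int.toChars (ds.foldl (fun a d => a * 10 + d) v)
      = PySem.Int.toChars v ++ ds.map (fun d => Nat.digitChar d.toNat) := by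
  intro ds
  induction ds with
  | nil => intro v _ _; simp
  | cons d ds' ih =>
    intro v hv hds
    have hd := hds d (by simp)
    simp only [List.foldl_cons, List.map_cons]
    rw [ih (v * 10 + d) (by omega) (fun x hx => hds x (by simp [hx]))]
    rw [toChars_shift v d hv hd.1 hd.2, List.append_assoc]
    rfl

lemma toChars_single (f : Int) (h1 : 1 ≤ f) (h9 : f < 10) :
    PySem.Int.toChars f = [Nat.digitChar f.toNat] := by
  interval_cases f <;> decide

lemma digitChar_inj (a b : Int) (ha0 : 0 ≤ a) (ha9 : a < 10) (hb0 : 0 ≤ b) (hb9 : b < 10) :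
    Nat.digitChar a.toNat = Nat.digitChar b.toNat → a = b := by
  interval_cases a <;> interval_cases b <;> decide

lemma mem_poolOf (d f : Int) : d ∈ poolOf f ↔ (0 ≤ d ∧ d < 10) ∧ d ≠ f := by
  unfold poolOf
  rw [List.mem_filter, PySem.List.mem_pyRange_one]
  simp

lemma mem_bPre (p : Int) :
    p ∈ bPre ↔ 100000 ≤ p ∧ p < 1000000 ∧ (PySem.Int.toChars p).Nodup := by
  unfold bPre
  rw [List.mem_flatMap]
  constructor
  · rintro ⟨f, hf, hmem⟩
    rw [PySem.List.mem_pyRange_one] at hf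
    obtain ⟨ds, hlen, hnd, hsub, hp⟩ := (mem_genP 5 f (poolOf f) p).mp hmem
    have hpool : ∀ d ∈ poolOf f, 0 ≤ d ∧ d < 10 := fun d hd => ((mem_poolOf d f).mp hd).1
    have hb := bound_genP 5 f (poolOf f) p hpool hmem
    norm_num at hb
    refine ⟨by omega, by omega, ?_⟩
    have hdsb : ∀ d ∈ ds, 0 ≤ d ∧ d < 10 := fun d hd => hpool d (hsub d hd)
    have hchars : PySem.Int.toChars p = (f :: ds).map (fun d => Nat.digitChar d.toNat) := by
      rw [hp, toChars_foldl ds f (by omega) hdsb, toChars_single f (by omega) (by omega)]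
      rfl
    rw [hchars]
    apply List.Nodup.map_on
    · intro x hx y hy hxy
      have hxb : 0 ≤ x ∧ x < 10 := by
        rcases List.mem_cons.mp hx with h | h
        · subst h; omega
        · exact hdsb x h
      have hyb : 0 ≤ y ∧ y < 10 := by
        rcases List.mem_cons.mp hy with h | h
        · subst h; omega
        · exact hdsb y h
      exact digitChar_inj x y hxb.1 hxb.2 hyb.1 hyb.2 hxy
    · refine List.nodup_cons.mpr ⟨?_, hnd⟩
      intro hfin
      exact ((mem_poolOf f f).mp (hsub f hfin)).2 rfl
  · rintro ⟨h1, h2, hnd⟩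
    refine ⟨p / 100000, ?_, ?_⟩
    · rw [PySem.List.mem_pyRange_one]; omega
    · set f := p / 100000 with hf
      set d2 := p / 10000 % 10 with hd2
      set d3 := p / 1000 % 10 with hd3
      set d4 := p / 100 % 10 with hd4
      set d5 := p / 10 % 10 with hd5
      set d6 := p % 10 with hd6
      have hfb : 1 ≤ f ∧ f < 10 := by constructor <;> omega
      have hb2 : 0 ≤ d2 ∧ d2 < 10 := by constructor <;> omega
      have hb3 : 0 ≤ d3 ∧ d3 < 10 := by constructor <;> omega
      have hb4 : 0 ≤ d4 ∧ d4 < 10 := by constructor <;> omega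
      have hb5 : 0 ≤ d5 ∧ d5 < 10 := by constructor <;> omega
      have hb6 : 0 ≤ d6 ∧ d6 < 10 := by constructor <;> omega
      have hrec : p = ((((f * 10 + d2) * 10 + d3) * 10 + d4) * 10 + d5) * 10 + d6 := by omega
      have hds : ∀ d ∈ [d2, d3, d4, d5, d6], 0 ≤ d ∧ d < 10 := by
        intro d hd
        simp at hd
        rcases hd with h | h | h | h | h <;> subst h <;> assumption
      have hfold : p = List.foldl (fun a d => a * 10 + d) f [d2, d3, d4, d5, d6] := by
        simp [List.foldl]; omega
      have hchars : PySem.Int.toChars p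
          = (f :: [d2, d3, d4, d5, d6]).map (fun d => Nat.digitChar d.toNat) := by
        rw [hfold, toChars_foldl _ f hfb.1 hds, toChars_single f hfb.1 hfb.2]
        rfl
      have hndl : (f :: [d2, d3, d4, d5, d6]).Nodup := by
        apply List.Nodup.of_map (fun d => Nat.digitChar d.toNat)
        rw [← hchars]
        exact hnd
      apply (mem_genP 5 f (poolOf f) p).mpr
      refine ⟨[d2, d3, d4, d5, d6], rfl, (List.nodup_cons.mp hndl).2, ?_, hfold⟩
      intro d hd
      apply (mem_poolOf d f).mpr
      refine ⟨hds d hd, ?_⟩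
      intro he
      exact (List.nodup_cons.mp hndl).1 (he ▸ hd)

lemma nodup_bPre : bPre.Nodup := by
  unfold bPre
  apply List.nodup_flatMap.mpr
  constructor
  · intro f _
    exact nodup_genP 5 f (poolOf f) (fun d hd => ((mem_poolOf d f).mp hd).1)
      ((PySem.List.nodup_pyRange_one 0 10).filter _)
  · apply List.Pairwise.imp_of_mem (R := fun a b => a ≠ b)
    · intro a b ha hb hne p hpa hpb
      rw [PySem.List.mem_pyRange_one] at ha hb
      have hba := bound_genP 5 a (poolOf a) p (fun d hd => ((mem_poolOf d a).mp hd).1) hpa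
      have hbb := bound_genP 5 b (poolOf b) p (fun d hd => ((mem_poolOf d b).mp hd).1) hpb
      norm_num at hba hbb
      omega
    · exact PySem.List.nodup_pyRange_one 1 10

-- ---- the per-candidate predicates agree on the six-digit range ----

-- length of Nat.toDigitsCore via Nat.digits
lemma toDigitsCore_length_eq : ∀ (f n : ℕ) (l : List Char), 0 < n → n < f →
    (Nat.toDigitsCore 10 f n l).length = (Nat.digits 10 n).length + l.length := by
  intro f
  induction f with
  | zero => intro n l hn hf; omega
  | succ f ih =>
    intro n l hn hf
    rw [Nat.toDigitsCore.eq_def]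
    simp only []
    by_cases h : n / 10 = 0
    · rw [if_pos h, Nat.digits_def' (by norm_num : (1:ℕ) < 10) hn, h, Nat.digits_zero]
      simp; omega
    · rw [if_neg h]
      rw [ih (n/10) _ (Nat.pos_of_ne_zero h) (by omega)]
      rw [Nat.digits_def' (by norm_num : (1:ℕ) < 10) hn]
      simp; omega

-- str(p) of a six-digit number has six characters
lemma toStr_length_six (p : Int) (h1 : 100000 ≤ p) (h2 : p < 999999) :
    (PySem.Int.toStr p).toList.length = 6 := by
  rw [PySem.Int.toList_toStr]
  unfold PySem.Int.toChars
  rw [if_neg (by omega)]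
  unfold Nat.toDigits
  have ha : (10:ℕ)^5 ≤ p.toNat := by norm_num; omega
  have hb : p.toNat < (10:ℕ)^(5+1) := by norm_num; omega
  rw [toDigitsCore_length_eq _ _ _ (by omega) (by omega)]
  rw [Nat.length_digits 10 p.toNat (by norm_num) (by omega)]
  rw [Nat.log_eq_of_pow_le_of_lt_pow ha hb]
  simp

lemma nodup_append_singleton_false (s : List Char) (c : Char) (h : (s ++ [c]).Nodup)
    (hm : c ∈ s) : False := by
  rcases List.nodup_append.mp h with ⟨-, -, hd⟩
  exact hd c hm c (by simp) rfl

-- size of set(cs) versus Nodup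
lemma foldl_add_length : ∀ (cs s : List Char), s.Nodup →
    ((cs.foldl PySem.Set.add s).length ≤ s.length + cs.length ∧
     ((cs.foldl PySem.Set.add s).length = s.length + cs.length ↔ (s ++ cs).Nodup)) := by
  intro cs
  induction cs with
  | nil => intro s h; simp [h]
  | cons c rest ih =>
    intro s h
    simp only [List.foldl_cons]
    by_cases hc : s.contains c
    · have hadd0 : PySem.Set.add s c = if s.contains c then s else s ++ [c] := rfl
      rw [hadd0, if_pos hc]
      have hih := ih s h
      have hcm : c ∈ s := List.contains_iff_mem.mp hc
      refine ⟨by have := hih.1; simp only [List.length_cons] at *; omega, ?_⟩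
      constructor
      · intro he
        exfalso
        have := hih.1
        simp only [List.length_cons] at *
        omega
      · intro hn
        exfalso
        rw [List.append_cons] at hn
        exact nodup_append_singleton_false _ _ (List.nodup_append.mp hn).1 hcm
    · have hadd0 : PySem.Set.add s c = if s.contains c then s else s ++ [c] := rfl
      rw [hadd0, if_neg hc]
      have hcmn : c ∉ s := fun hm => hc (List.contains_iff_mem.mpr hm)
      have hns : (s ++ [c]).Nodup := by
        rw [List.nodup_append]
        exact ⟨h, List.nodup_singleton c, by
          intro a ha b hb; simp at hb; subst hb; exact fun he => hcmn (he ▸ ha)⟩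
      have hih := ih (s ++ [c]) hns
      have hre : (s ++ [c]) ++ rest = s ++ c :: rest := by simp
      have hlen : (s ++ [c]).length + rest.length = s.length + (c :: rest).length := by
        simp; omega
      rw [hre, hlen] at hih
      exact hih

lemma setLen_eq_nodup (cs : List Char) (hl : cs.length = 6) :
    ((PySem.Set.ofList cs).length = 6 ↔ cs.Nodup) := by
  have h := foldl_add_length cs [] List.nodup_nil
  simp only [List.length_nil, List.nil_append, Nat.zero_add, hl] at h
  show (cs.foldl PySem.Set.add []).length = 6 ↔ cs.Nodup
  exact h.2

-- the break-loop over samples is an 'all'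
lemma allMatchA_eq_all : ∀ (l : List (Int × Int)) (p : Int),
    allMatchA l p = l.all (fun sm => countMatching p sm.1 == sm.2) := by
  intro l p
  induction l with
  | nil => rfl
  | cons hd tl ih =>
    obtain ⟨s, m⟩ := hd
    by_cases h : countMatching p s = m <;> simp [allMatchA, h, ih]

-- index-comprehension count equals zip count (Nat level)
lemma countP_range_min : ∀ (as bs : List Char),
    (List.range (min as.length bs.length)).countP (fun k => as[k]? == bs[k]?)
      = (as.zip bs).countP (fun xy => xy.1 == xy.2) := by
  intro as
  induction as with
  | nil => intro bs; simp
  | cons a as ih =>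
    intro bs
    cases bs with
    | nil => simp
    | cons b bs =>
      simp only [List.length_cons, Nat.succ_min_succ, List.range_succ_eq_map,
        List.countP_cons, List.countP_map, List.zip_cons_cons]
      rw [← ih bs]
      simp [Function.comp_def]

lemma countMatching_eq_zipsum (p s : Int) :
    countMatching p s
      = (((PySem.Int.toStr p).toList.zip (PySem.Int.toStr s).toList).map
          (fun ab => if ab.1 == ab.2 then (1 : Int) else 0)).sum := by
  unfold countMatching
  rw [PySem.List.sum_map_const_int]
  simp only [PySem.Str.len]
  rw [← Nat.cast_min]
  rw [PySem.List.pyRange_zero_natCast]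
  rw [List.filter_map, List.length_map]
  simp only [Function.comp_def]
  have h2 : ∀ k : ℕ, (PySem.Str.pyGet? (PySem.Int.toStr p) (k : Int)
        == PySem.Str.pyGet? (PySem.Int.toStr s) (k : Int))
      = ((PySem.Int.toStr p).toList[k]? == (PySem.Int.toStr s).toList[k]?) := by
    intro k
    simp [PySem.Str.pyGet?, PySem.Chars.pyGet?, PySem.List.pyGet?_natCast]
  rw [List.filter_congr (fun x _ => h2 x)]
  rw [← List.countP_eq_length_filter]
  rw [PySem.List.sum_map_ite_one_zero]
  rw [countP_range_min]
  simp

lemma allMatchA_eq_matchesAllB (map : List (Int × Int)) (p : Int) :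
    allMatchA map p = matchesAllB (samplesOf map) p := by
  rw [allMatchA_eq_all]
  unfold matchesAllB samplesOf
  rw [List.all_map]
  congr 1
  funext sm
  simp only [Function.comp_def]
  rw [countMatching_eq_zipsum]

lemma pA_iff (map : List (Int × Int)) (p : Int) (h1 : 100000 ≤ p) (h2 : p < 999999) :
    pA map p = true
      ↔ (PySem.Int.toChars p).Nodup ∧ matchesAllB (samplesOf map) p = true := by
  unfold pA
  rw [Bool.and_eq_true, decide_eq_true_iff]
  rw [setLen_eq_nodup _ (toStr_length_six p h1 h2)]
  rw [PySem.Int.toList_toStr, allMatchA_eq_matchesAllB]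

lemma chars_999999_not_nodup : ¬ (PySem.Int.toChars 999999).Nodup := by decide

-- ===== VERDICT (by name: the statement is the Claim_ definition above) =====
theorem guess_spec : Claim_equal_guess := by
  intro map _
  unfold Spec_guess
  rw [guess_eq_filter, guess_alt_eq]
  symm
  apply PySem.List.sorted_eq_of_perm_of_pairwise_lt
  · apply (List.perm_ext_iff_of_nodup
      ((PySem.List.nodup_pyRange_one 100000 999999).filter _)
      (nodup_bPre.filter _)).mpr
    intro p
    rw [List.mem_filter, List.mem_filter, PySem.List.mem_pyRange_one, mem_bPre]
    constructor
    · rintro ⟨⟨hl, hr⟩, hpa⟩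
      have := (pA_iff map p hl hr).mp hpa
      exact ⟨⟨hl, by omega, this.1⟩, this.2⟩
    · rintro ⟨⟨hl, hr, hnd⟩, hmb⟩
      have hne : p ≠ 999999 := by
        intro he
        exact chars_999999_not_nodup (he ▸ hnd)
      have hr' : p < 999999 := by omega
      exact ⟨⟨hl, hr'⟩, (pA_iff map p hl hr').mpr ⟨hnd, hmb⟩⟩
  · exact (PySem.List.pairwise_lt_pyRange_one 100000 999999).filter _
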